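-- pv_equiv track=rewrite | github.com/UTD-FAST-Lab/TracePruner | scripts/static_cg_generation/doop/reformat/reformat_doop_linewise.py | java_type_to_descriptor
-- ===== SOURCE A (Python) =====
-- def java_type_to_descriptor(jtype):
--     jtype = jtype.strip()
--     # Array types
--     if jtype.endswith("[]"):
--         return "[" + java_type_to_descriptor(jtype[:-2])
--     # Primitives
--     primitives = {
--         "void": "V", "int": "I", "float": "F", "double": "D",
--         "long": "J", "boolean": "Z", "char": "C", "short": "S", "byte": "B"
--     }
--     if jtype in primitives:
--         return primitives[jtype]
--     # Object types
--     return f"L{jtype.replace('.', '/')};"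
-- ===== SOURCE B (Python) =====
-- PRIMITIVES = {
--     "void": "V", "int": "I", "float": "F", "double": "D",
--     "long": "J", "boolean": "Z", "char": "C", "short": "S", "byte": "B"
-- }
--
-- def java_type_to_descriptor(jtype):
--     # scan the reversed string once with an index: count "][" groups,
--     # skipping whitespace after each (mirrors A's per-level strip)
--     rev = jtype.strip()[::-1]
--     count = 0
--     i = 0
--     while rev.startswith("][", i):
--         count += 1
--         i += 2
--         while i < len(rev) and rev[i].isspace():
--             i += 1
--     base = rev[i:][::-1]
--     if base in PRIMITIVES:
--         return "[" * count + PRIMITIVES[base]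
--     return "[" * count + "L" + base.replace('.', '/') + ";"
-- ===== Notes on version B (the rewrite author's own statement) =====
-- stated objective: alternative
-- what changed: Replaces A's self-recursion with repeated strip/slice by a single index-based scan over the reversed string that counts bracket-pair groups (skipping whitespace after each) and then builds the descriptor from the remaining characters once.
import Mathlib
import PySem

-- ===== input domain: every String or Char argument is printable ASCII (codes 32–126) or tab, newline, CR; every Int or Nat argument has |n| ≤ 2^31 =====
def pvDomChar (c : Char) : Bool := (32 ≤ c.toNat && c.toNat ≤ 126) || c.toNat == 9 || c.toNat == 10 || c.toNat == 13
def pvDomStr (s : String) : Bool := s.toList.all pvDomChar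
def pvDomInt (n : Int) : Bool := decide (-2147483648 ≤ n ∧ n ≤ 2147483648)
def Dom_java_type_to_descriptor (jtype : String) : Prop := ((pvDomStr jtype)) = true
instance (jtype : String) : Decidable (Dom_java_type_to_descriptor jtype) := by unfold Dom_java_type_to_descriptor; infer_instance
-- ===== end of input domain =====

-- B replaces A's self-recursion with repeated strip/slice by one index scan over the
-- reversed character list: count bracket-pair groups (skipping whitespace after each), then build
-- the descriptor once from the remaining characters (alternative decomposition).

-- the primitives dict literal, shared verbatim by both Python versions
def pvPrimitives : PySem.Dict String String :=
  PySem.Dict.ofList [("void", "V"), ("int", "I"), ("float", "F"), ("double", "D"),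
    ("long", "J"), ("boolean", "Z"), ("char", "C"), ("short", "S"), ("byte", "B")]

-- termination helpers (cited by the ports' decreasing_by)
theorem pv_strip_len_le (x : String) :
    (PySem.Str.strip x).toList.length ≤ x.toList.length := by
  simp only [PySem.Str.toList_strip, PySem.Chars.strip, PySem.Chars.rstrip, PySem.Chars.lstrip,
    List.length_reverse]
  exact le_trans (List.length_dropWhile_le _ _)
    (by simpa using List.length_dropWhile_le PySem.Chars.isspace x.toList)

theorem pv_endswith_len (s : String) (h : PySem.Str.endswith s "[]" = true) :
    2 ≤ s.toList.length := by
  rw [PySem.Str.endswith] at h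
  have hsuf := (PySem.Chars.endswith_iff _ _).mp h
  have := hsuf.length_le
  simpa using this

theorem pv_slice2_len (s : String) (h : PySem.Str.endswith s "[]" = true) :
    (PySem.Str.slice s none (some (-2))).toList.length ≤ s.toList.length - 2 := by
  have h2 := pv_endswith_len s h
  rw [PySem.Str.slice]
  simp only [String.toList_ofList, PySem.Chars.slice_eq_listSlice]
  rw [PySem.List.slice_to_neg_ofNat s.toList 2 (by omega)]
  simp

theorem pv_sw_len (l : List Char) (h : PySem.Chars.startswith l [']', '['] = true) :
    2 ≤ l.length := by
  have := ((PySem.Chars.startswith_iff _ _).mp h).length_le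
  simpa using this

-- ===== PORT A =====
def java_type_to_descriptor (jtype : String) : String :=
  let s := PySem.Str.strip jtype
  if PySem.Str.endswith s "[]" then
    "[" ++ java_type_to_descriptor (PySem.Str.slice s none (some (-2)))
  else if pvPrimitives.contains s then
    pvPrimitives.getD s ""
  else
    "L" ++ PySem.Str.replace s "." "/" ++ ";"
termination_by jtype.toList.length
decreasing_by
  have h1 := pv_strip_len_le jtype
  have h2 := pv_endswith_len (PySem.Str.strip jtype) (by assumption)
  have h3 := pv_slice2_len (PySem.Str.strip jtype) (by assumption)
  omega

-- ===== PORT B =====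
-- the outer while loop of Source B on the reversed character list: the index i is the list
-- already consumed, so `rev.startswith("][", i)` is a head test, `i += 2` a drop, and the
-- inner whitespace-skipping loop a dropWhile
def pvAltScan (l : List Char) : Nat × List Char :=
  if PySem.Chars.startswith l [']', '['] then
    let r := pvAltScan ((l.drop 2).dropWhile PySem.Chars.isspace)
    (r.1 + 1, r.2)
  else
    (0, l)
termination_by l.length
decreasing_by
  have h1 := pv_sw_len l (by assumption)
  have h2 := List.length_dropWhile_le PySem.Chars.isspace (l.drop 2)
  simp only [List.length_drop] at h2
  omega

def java_type_to_descriptor_alt (jtype : String) : String :=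
  let rev := (PySem.Str.strip jtype).toList.reverse
  let r := pvAltScan rev
  let base := String.ofList r.2.reverse
  if pvPrimitives.contains base then
    String.ofList (List.replicate r.1 '[') ++ pvPrimitives.getD base ""
  else
    String.ofList (List.replicate r.1 '[') ++ ("L" ++ PySem.Str.replace base "." "/" ++ ";")

-- ===== PRECONDITION & SPEC =====
def Spec_java_type_to_descriptor (jtype : String) (out : String) : Prop := out = java_type_to_descriptor_alt jtype
instance (jtype : String) (out : String) : Decidable (Spec_java_type_to_descriptor jtype out) := by unfold Spec_java_type_to_descriptor; infer_instance

-- ===== CLAIM (what is proved, stated in full; the proofs are below) =====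
def Claim_equal_java_type_to_descriptor : Prop := ∀ (jtype : String), Dom_java_type_to_descriptor jtype → Spec_java_type_to_descriptor jtype (java_type_to_descriptor jtype)

-- ===== LEMMAS AND PROOFS =====

-- the base-descriptor computation, parameterised by the (reversed) remaining characters
def pvBaseR (rl : List Char) : String :=
  let base := String.ofList rl.reverse
  if pvPrimitives.contains base then pvPrimitives.getD base ""
  else "L" ++ PySem.Str.replace base "." "/" ++ ";"

-- a prefix of a dropWhile result is itself dropWhile-stable
theorem pv_dropWhile_prefix (p : Char → Bool) (l m : List Char)
    (h : m <+: List.dropWhile p l) : List.dropWhile p m = m := by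
  cases m with
  | nil => rfl
  | cons c t =>
    obtain ⟨r, hr⟩ := h
    have hne : List.dropWhile p l ≠ [] := by rw [← hr]; simp
    have hc := List.head_dropWhile_not p hne
    have : (List.dropWhile p l).head hne = c := by
      simp [← hr]
    rw [this] at hc
    simp [hc]

theorem pv_strip_idem_chars (l : List Char) :
    PySem.Chars.strip (PySem.Chars.strip l) = PySem.Chars.strip l := by
  simp only [PySem.Chars.strip, PySem.Chars.rstrip, PySem.Chars.lstrip]
  set sp := PySem.Chars.isspace
  set a := List.dropWhile sp l with ha
  set b := List.dropWhile sp a.reverse with hb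
  have hpre : b.reverse <+: a := by
    have : b <:+ a.reverse := by rw [hb]; exact List.dropWhile_suffix sp
    simpa using this.reverse
  have h1 : List.dropWhile sp b.reverse = b.reverse :=
    pv_dropWhile_prefix sp l _ hpre
  have h2 : List.dropWhile sp b = b :=
    pv_dropWhile_prefix sp a.reverse b (hb ▸ List.prefix_refl _)
  rw [h1, List.reverse_reverse, h2]

theorem pv_strip_idem (s : String) :
    PySem.Str.strip (PySem.Str.strip s) = PySem.Str.strip s := by
  apply String.toList_inj.mp
  simp [pv_strip_idem_chars]

-- a stripped string has no leading whitespace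
theorem pv_nolead (s : String) (hs : PySem.Str.strip s = s) :
    List.dropWhile PySem.Chars.isspace s.toList = s.toList := by
  have hl : s.toList = PySem.Chars.strip s.toList := by
    conv_lhs => rw [← hs]
    simp
  rw [hl]
  simp only [PySem.Chars.strip, PySem.Chars.rstrip, PySem.Chars.lstrip]
  set sp := PySem.Chars.isspace
  set a := List.dropWhile sp s.toList with ha
  set b := List.dropWhile sp a.reverse with hb
  have hpre : b.reverse <+: a := by
    have : b <:+ a.reverse := by rw [hb]; exact List.dropWhile_suffix sp
    simpa using this.reverse
  exact pv_dropWhile_prefix sp s.toList _ hpre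

-- A is insensitive to pre-stripping its argument
theorem pv_jtd_strip (x : String) :
    java_type_to_descriptor (PySem.Str.strip x) = java_type_to_descriptor x := by
  rw [java_type_to_descriptor.eq_def, java_type_to_descriptor.eq_def, pv_strip_idem]

-- the head test on the reversed list is A's endswith test
theorem pv_sw_ew (s : String) :
    PySem.Chars.startswith s.toList.reverse [']', '['] = PySem.Str.endswith s "[]" := by
  rw [Bool.eq_iff_iff, PySem.Chars.startswith_iff, PySem.Str.endswith,
    PySem.Chars.endswith_iff]
  constructor
  · intro h
    have : (['[', ']'] : List Char).reverse <+: s.toList.reverse := h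
    have := List.reverse_prefix.mp this
    simpa using this
  · intro h
    have : ("[]".toList : List Char) <:+ s.toList := by simpa using h
    have := List.reverse_prefix.mpr this
    simpa using this

-- unfolding lemmas for the scan
theorem pv_scan_false (l : List Char) (h : PySem.Chars.startswith l [']', '['] = false) :
    pvAltScan l = (0, l) := by
  rw [pvAltScan, h]
  simp

theorem pv_scan_true (l : List Char) (h : PySem.Chars.startswith l [']', '['] = true) :
    pvAltScan l = ((pvAltScan ((l.drop 2).dropWhile PySem.Chars.isspace)).1 + 1,
      (pvAltScan ((l.drop 2).dropWhile PySem.Chars.isspace)).2) := by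
  rw [pvAltScan, h]
  simp

theorem pv_jtd_false (s : String) (hs : PySem.Str.strip s = s)
    (h : PySem.Str.endswith s "[]" = false) : java_type_to_descriptor s = pvBaseR s.toList.reverse := by
  rw [java_type_to_descriptor.eq_def]
  simp only [hs, h, Bool.false_eq_true, if_false, pvBaseR, List.reverse_reverse,
    String.ofList_toList]

theorem pv_jtd_true (s : String) (hs : PySem.Str.strip s = s)
    (h : PySem.Str.endswith s "[]" = true) :
    java_type_to_descriptor s = "[" ++ java_type_to_descriptor (PySem.Str.slice s none (some (-2))) := by
  conv_lhs => rw [java_type_to_descriptor.eq_def]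
  simp only [hs, h, if_true]

-- the recursive argument of A, seen from the reversed list of B's scan
theorem pv_slice_rev (s : String) (hs : PySem.Str.strip s = s)
    (h : PySem.Str.endswith s "[]" = true) :
    (PySem.Str.strip (PySem.Str.slice s none (some (-2)))).toList.reverse
      = (s.toList.reverse.drop 2).dropWhile PySem.Chars.isspace := by
  have h2 := pv_endswith_len s h
  have hsl : (PySem.Str.slice s none (some (-2))).toList = s.toList.take (s.toList.length - 2) := by
    rw [PySem.Str.slice]
    simp only [String.toList_ofList, PySem.Chars.slice_eq_listSlice]
    rw [PySem.List.slice_to_neg_ofNat s.toList 2 (by omega)]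
  have htake : s.toList.take (s.toList.length - 2) = (s.toList.reverse.drop 2).reverse := by
    rw [List.reverse_drop]
    simp
  have hpref : (s.toList.reverse.drop 2).reverse <+: s.toList := by
    rw [← htake]; exact List.take_prefix _ _
  have hlstrip : List.dropWhile PySem.Chars.isspace ((s.toList.reverse.drop 2).reverse)
      = (s.toList.reverse.drop 2).reverse := by
    apply pv_dropWhile_prefix PySem.Chars.isspace s.toList
    rw [pv_nolead s hs]; exact hpref
  simp only [PySem.Str.toList_strip, hsl, htake, PySem.Chars.strip, PySem.Chars.rstrip,
    PySem.Chars.lstrip, hlstrip, List.reverse_reverse]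

theorem pv_prefix_push (c : Nat) (x : String) :
    "[" ++ (String.ofList (List.replicate c '[') ++ x)
      = String.ofList (List.replicate (c + 1) '[') ++ x := by
  apply String.toList_inj.mp
  simp [List.replicate_succ]

-- main invariant: A on a stripped s equals B's scan of the reversed characters
theorem pv_main (n : Nat) : ∀ (s : String), s.toList.length ≤ n →
    PySem.Str.strip s = s →
    java_type_to_descriptor s
      = String.ofList (List.replicate (pvAltScan s.toList.reverse).1 '[')
        ++ pvBaseR (pvAltScan s.toList.reverse).2 := by
  induction n with
  | zero =>
    intro s hn hs
    have h : PySem.Str.endswith s "[]" = false := by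
      rcases hb : PySem.Str.endswith s "[]" with _ | _
      · rfl
      · have := pv_endswith_len s hb; omega
    rw [pv_scan_false _ (by rw [pv_sw_ew, h]), pv_jtd_false s hs h]
    apply String.toList_inj.mp
    simp
  | succ m ih =>
    intro s hn hs
    rcases hb : PySem.Str.endswith s "[]" with _ | _
    · rw [pv_scan_false _ (by rw [pv_sw_ew, hb]), pv_jtd_false s hs hb]
      apply String.toList_inj.mp
      simp
    · rw [pv_scan_true _ (by rw [pv_sw_ew, hb]), pv_jtd_true s hs hb]
      set u := PySem.Str.strip (PySem.Str.slice s none (some (-2))) with hu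
      rw [← pv_jtd_strip (PySem.Str.slice s none (some (-2))), ← hu]
      have hrev : u.toList.reverse = (s.toList.reverse.drop 2).dropWhile PySem.Chars.isspace := by
        rw [hu]; exact pv_slice_rev s hs hb
      have hlen : u.toList.length ≤ m := by
        have h1 : u.toList.length = u.toList.reverse.length := by simp
        rw [h1, hrev]
        have h2 := List.length_dropWhile_le PySem.Chars.isspace (s.toList.reverse.drop 2)
        have h3 := pv_endswith_len s hb
        simp only [List.length_drop, List.length_reverse] at h2 ⊢
        omega
      have hstu : PySem.Str.strip u = u := by rw [hu]; exact pv_strip_idem _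
      rw [ih u hlen hstu, hrev]
      exact pv_prefix_push _ _

-- ===== VERDICT (by name: the statement is the Claim_ definition above) =====
theorem java_type_to_descriptor_spec : Claim_equal_java_type_to_descriptor := by
  intro jtype _
  unfold Spec_java_type_to_descriptor java_type_to_descriptor_alt
  rw [← pv_jtd_strip jtype]
  have h := pv_main (PySem.Str.strip jtype).toList.length (PySem.Str.strip jtype)
    (le_refl _) (pv_strip_idem jtype)
  rw [h, pvBaseR]
  simp only []
  split <;> rfl
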